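-- pv_equiv track=rewrite | github.com/yahyaghazi/TLDR_robot | tdlrscraper.py | _clean_and_validate_articles
-- ===== SOURCE A (Python) =====
-- from typing import List, Dict, Any
--
-- def _clean_and_validate_articles(articles: List[Dict[str, Any]]) -> List[Dict[str, Any]]:
--     """Nettoie et valide la liste d'articles"""
--     cleaned = []
--     seen_titles = set()
--
--     for article in articles:
--         title = article.get('titre', '').strip()
--
--         # Validation
--         if (len(title) < 10 or
--             title.lower() in seen_titles or
--             any(skip in title.lower() for skip in [
--                 'subscribe', 'unsubscribe', 'privacy policy',
--                 'terms of service', 'contact us'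
--             ])):
--             continue
--
--         seen_titles.add(title.lower())
--         cleaned.append(article)
--
--     return cleaned
-- ===== SOURCE B (Python) =====
-- def _clean_and_validate_articles(articles):
--     """Nettoie et valide la liste d'articles (filter, then dedupe by deleting later duplicates)"""
--     skip_phrases = ('subscribe', 'unsubscribe', 'privacy policy',
--                     'terms of service', 'contact us')
--
--     def _key(article):
--         return article.get('titre', '').strip().lower()
--
--     def _valid(article):
--         title = article.get('titre', '').strip()
--         return len(title) >= 10 and not any(p in title.lower() for p in skip_phrases)
--
--     # Dedupe without a seen-set: repeatedly take the head and delete every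
--     # later article carrying the same key, so first occurrences survive in order.
--     items = [a for a in articles if _valid(a)]
--     out = []
--     while items:
--         head = items[0]
--         k = _key(head)
--         out.append(head)
--         items = [x for x in items[1:] if _key(x) != k]
--     return out
-- ===== Notes on version B (the rewrite author's own statement) =====
-- stated objective: alternative
-- what changed: Replaced A's single stateful loop with a seen-titles set by a stateless validity filter followed by a set-free dedupe that repeatedly takes the head and deletes all later articles with the same lowercased title.
import Mathlib
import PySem

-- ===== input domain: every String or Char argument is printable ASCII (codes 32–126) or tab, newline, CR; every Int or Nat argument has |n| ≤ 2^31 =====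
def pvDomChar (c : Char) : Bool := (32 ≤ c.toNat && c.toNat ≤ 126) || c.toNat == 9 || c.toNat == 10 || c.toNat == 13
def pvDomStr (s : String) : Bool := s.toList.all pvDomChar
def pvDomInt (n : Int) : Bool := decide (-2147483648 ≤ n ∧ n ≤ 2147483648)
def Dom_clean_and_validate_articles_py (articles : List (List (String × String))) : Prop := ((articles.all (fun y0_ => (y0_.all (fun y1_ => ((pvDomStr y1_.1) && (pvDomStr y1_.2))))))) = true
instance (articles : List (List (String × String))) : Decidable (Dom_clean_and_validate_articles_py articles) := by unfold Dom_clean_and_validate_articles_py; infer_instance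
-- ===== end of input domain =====

-- B replaces A's single stateful loop (seen-titles set) by a stateless validity filter followed by a
-- set-free dedupe that repeatedly keeps the head and deletes all later same-title articles; same output.

-- ===== PORT A =====
def pvSkipPhrases : List String :=
  ["subscribe", "unsubscribe", "privacy policy", "terms of service", "contact us"]

def clean_and_validate_articles_py (articles : List (List (String × String))) : List (List (String × String)) :=
  (articles.foldl
    (fun (st : List (List (String × String)) × PySem.Set String) article =>
      let title := PySem.Str.strip (PySem.Dict.getD (PySem.Dict.mk article) "titre" "")
      if decide (PySem.Str.len title < 10)
         || PySem.Set.contains st.2 (PySem.Str.lower title)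
         || pvSkipPhrases.any (fun skip => PySem.Str.isIn skip (PySem.Str.lower title))
      then st
      else (st.1 ++ [article], PySem.Set.add st.2 (PySem.Str.lower title)))
    ([], PySem.Set.empty)).1

-- ===== PORT B =====
def pvKey (article : List (String × String)) : String :=
  PySem.Str.lower (PySem.Str.strip (PySem.Dict.getD (PySem.Dict.mk article) "titre" ""))

def pvValid (article : List (String × String)) : Bool :=
  let title := PySem.Str.strip (PySem.Dict.getD (PySem.Dict.mk article) "titre" "")
  decide (10 ≤ PySem.Str.len title)
    && !(pvSkipPhrases.any (fun p => PySem.Str.isIn p (PySem.Str.lower title)))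

-- Source B's while-loop: take the head, drop every later item with the same key.
def pvDedup : List (List (String × String)) → List (List (String × String))
  | [] => []
  | head :: rest =>
    head :: pvDedup (rest.filter (fun x => pvKey x != pvKey head))
termination_by xs => xs.length
decreasing_by
  simpa using Nat.lt_succ_of_le (List.length_filter_le _ rest)

def clean_and_validate_articles_py_alt (articles : List (List (String × String))) : List (List (String × String)) :=
  pvDedup (articles.filter pvValid)

-- ===== PRECONDITION & SPEC =====
def Spec_clean_and_validate_articles_py (articles : List (List (String × String))) (out : List (List (String × String))) : Prop := out = clean_and_validate_articles_py_alt articles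
instance (articles : List (List (String × String))) (out : List (List (String × String))) : Decidable (Spec_clean_and_validate_articles_py articles out) := by unfold Spec_clean_and_validate_articles_py; infer_instance

-- ===== CLAIM =====
def Claim_equal_clean_and_validate_articles_py : Prop := ∀ (articles : List (List (String × String))), Dom_clean_and_validate_articles_py articles → Spec_clean_and_validate_articles_py articles (clean_and_validate_articles_py articles)

-- ===== LEMMAS AND PROOFS =====

-- the simplified step A performs on a valid article
def pvStep (st : List (List (String × String)) × PySem.Set String)
    (a : List (String × String)) : List (List (String × String)) × PySem.Set String :=
  if PySem.Set.contains st.2 (pvKey a) then st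
  else (st.1 ++ [a], PySem.Set.add st.2 (pvKey a))

theorem pv_foldl_filter {α σ : Type} (f g : σ → α → σ) (ok : α → Bool)
    (h1 : ∀ s a, ok a = true → f s a = g s a)
    (h2 : ∀ s a, ok a = false → f s a = s) :
    ∀ (xs : List α) (s : σ), xs.foldl f s = (xs.filter ok).foldl g s := by
  intro xs
  induction xs with
  | nil => intro s; rfl
  | cons a tl ih =>
    intro s
    rw [List.foldl_cons, List.filter_cons]
    cases h : ok a with
    | true => rw [if_pos rfl, List.foldl_cons, h1 s a h, ih]
    | false => rw [if_neg (by simp), h2 s a h, ih]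

theorem pv_step_ok (s : List (List (String × String)) × PySem.Set String)
    (a : List (String × String)) (h : pvValid a = true) :
    (let title := PySem.Str.strip (PySem.Dict.getD (PySem.Dict.mk a) "titre" "")
     if decide (PySem.Str.len title < 10)
        || PySem.Set.contains s.2 (PySem.Str.lower title)
        || pvSkipPhrases.any (fun skip => PySem.Str.isIn skip (PySem.Str.lower title))
     then s
     else (s.1 ++ [a], PySem.Set.add s.2 (PySem.Str.lower title)))
    = pvStep s a := by
  simp only [pvValid, Bool.and_eq_true, decide_eq_true_eq, Bool.not_eq_eq_eq_not,
    Bool.not_true] at h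
  obtain ⟨hlen, hskip⟩ := h
  simp only [pvStep, pvKey]
  rw [show decide (PySem.Str.len (PySem.Str.strip (PySem.Dict.getD (PySem.Dict.mk a) "titre" "")) < 10) = false by
        simpa using hlen,
      hskip, Bool.or_false, Bool.false_or]

theorem pv_step_skip (s : List (List (String × String)) × PySem.Set String)
    (a : List (String × String)) (h : pvValid a = false) :
    (let title := PySem.Str.strip (PySem.Dict.getD (PySem.Dict.mk a) "titre" "")
     if decide (PySem.Str.len title < 10)
        || PySem.Set.contains s.2 (PySem.Str.lower title)
        || pvSkipPhrases.any (fun skip => PySem.Str.isIn skip (PySem.Str.lower title))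
     then s
     else (s.1 ++ [a], PySem.Set.add s.2 (PySem.Str.lower title))) = s := by
  simp only [pvValid, Bool.and_eq_false_iff, decide_eq_false_iff_not, not_le] at h
  rcases h with h1 | h2
  · rw [if_pos]; rw [decide_eq_true h1]; simp
  · rw [if_pos]; rw [Bool.not_eq_false'] at h2; rw [h2]; simp

theorem pv_contains_add (s : PySem.Set String) (k y : String) :
    PySem.Set.contains (PySem.Set.add s k) y
      = (PySem.Set.contains s y || y == k) := by
  rw [Bool.eq_iff_iff]
  simp [PySem.Set.mem_add]

-- the invariant: folding pvStep over xs appends, to acc, exactly the head-remove dedupe of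
-- the items of xs whose key is not already in seen
theorem pv_foldl_step_eq_dedup :
    ∀ (xs : List (List (String × String)))
      (acc : List (List (String × String))) (seen : PySem.Set String),
    (xs.foldl pvStep (acc, seen)).1
      = acc ++ pvDedup (xs.filter (fun x => !(PySem.Set.contains seen (pvKey x)))) := by
  intro xs
  induction xs with
  | nil => intro acc seen; simp [pvDedup]
  | cons a tl ih =>
    intro acc seen
    rw [List.foldl_cons, List.filter_cons]
    cases h : PySem.Set.contains seen (pvKey a) with
    | true =>
      rw [pvStep, if_pos h, ih]
      simp
    | false =>
      rw [pvStep, if_neg (by rw [h]; simp)]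
      simp only [Bool.not_false, if_pos]
      rw [ih, pvDedup]
      have hf : tl.filter (fun x => !(PySem.Set.contains (PySem.Set.add seen (pvKey a)) (pvKey x)))
          = (tl.filter (fun x => !(PySem.Set.contains seen (pvKey x)))).filter
              (fun x => pvKey x != pvKey a) := by
        rw [List.filter_filter]
        apply List.filter_congr
        intro x _
        rw [pv_contains_add]
        cases hc : PySem.Set.contains seen (pvKey x) <;> cases he : pvKey x == pvKey a <;>
          simp [hc, he] <;> simpa using he
      rw [hf]
      simp

-- ===== VERDICT =====
theorem clean_and_validate_articles_py_spec : Claim_equal_clean_and_validate_articles_py := by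
  intro articles _
  unfold Spec_clean_and_validate_articles_py clean_and_validate_articles_py clean_and_validate_articles_py_alt
  rw [pv_foldl_filter _ pvStep pvValid pv_step_ok pv_step_skip,
      pv_foldl_step_eq_dedup]
  simp [PySem.Set.empty]
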